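-- pv_equiv track=rewrite | github.com/BurgerAndreas/q-spin-boson | q-spin-boson/src/helpers/binary.py | unary_sequence
-- ===== SOURCE A (Python) =====
-- def unary_sequence(numbers=3, length=None):
--     if length:
--         numbers = length
--     un_seq = []
--     for i in range(numbers):
--         zero_before = str(0) * i
--         zero_after = str(0) * (numbers - i - 1)
--         this_unary = zero_before + str(1) + zero_after
--         un_seq.append(this_unary)
--     return un_seq
-- ===== SOURCE B (Python) =====
-- def unary_sequence(numbers=3, length=None):
--     if length:
--         numbers = length
--     return [format(1 << (numbers - 1 - i), '0{}b'.format(numbers))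
--             for i in range(numbers)]
-- ===== Notes on version B (the rewrite author's own statement) =====
-- stated objective: idiomatic
-- what changed: Each one-hot row is produced as the zero-padded binary representation of the integer 2**(numbers-1-i) (a single format call) instead of concatenating three hand-built substrings in an accumulator loop.
import Mathlib
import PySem

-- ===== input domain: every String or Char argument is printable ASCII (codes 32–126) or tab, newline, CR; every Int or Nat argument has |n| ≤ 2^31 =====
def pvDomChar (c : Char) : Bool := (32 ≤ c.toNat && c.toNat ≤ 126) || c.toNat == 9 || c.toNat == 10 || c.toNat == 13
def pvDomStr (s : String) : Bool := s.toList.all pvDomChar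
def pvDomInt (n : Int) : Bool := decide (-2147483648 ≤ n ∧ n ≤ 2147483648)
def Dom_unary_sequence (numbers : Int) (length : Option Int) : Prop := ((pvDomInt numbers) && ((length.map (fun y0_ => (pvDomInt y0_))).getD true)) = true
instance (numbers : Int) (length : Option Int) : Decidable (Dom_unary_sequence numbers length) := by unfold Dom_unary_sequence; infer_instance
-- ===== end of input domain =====

-- B builds each one-hot row as the zero-padded binary representation of 2^(numbers-1-i)
-- instead of concatenating three hand-built substrings in an accumulator loop (idiomatic).

-- ===== PORT A =====
-- Python truthiness of `if length:` — true iff length is not None and nonzero.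
def pyTruthyOptInt (o : Option Int) : Bool :=
  match o with
  | none => false
  | some l => l != 0

def unary_sequence (numbers : Int) (length : Option Int) : List String :=
  let numbers := if pyTruthyOptInt length then length.getD numbers else numbers
  (PySem.List.pyRange 0 numbers 1).foldl (fun un_seq i =>
    let zero_before := List.replicate i.toNat '0'           -- str(0) * i  (i ≥ 0 in the loop)
    let zero_after := List.replicate (numbers - i - 1).toNat '0'
    let this_unary := String.mk (zero_before ++ ['1'] ++ zero_after)
    un_seq ++ [this_unary]) []

-- ===== PORT B =====
-- binary digits of a positive natural, most significant first (empty for 0); the recursion of int→'b' formatting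
def binDigits (m : Nat) : List Char :=
  if m = 0 then [] else binDigits (m / 2) ++ [if m % 2 == 1 then '1' else '0']
  termination_by m
  decreasing_by exact Nat.div_lt_self (Nat.pos_of_ne_zero (by assumption)) (by norm_num)

-- format(x, '0{w}b'): binary representation of x left-padded with '0' to width w
def fmtBin (x w : Nat) : String :=
  let s := if x == 0 then ['0'] else binDigits x
  String.mk (List.replicate (w - s.length) '0' ++ s)

def unary_sequence_alt (numbers : Int) (length : Option Int) : List String :=
  let numbers := if pyTruthyOptInt length then length.getD numbers else numbers
  (PySem.List.pyRange 0 numbers 1).map (fun i =>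
    fmtBin (2 ^ (numbers - 1 - i).toNat) numbers.toNat)

-- ===== PRECONDITION & SPEC =====
def Spec_unary_sequence (numbers : Int) (length : Option Int) (out : List String) : Prop := out = unary_sequence_alt numbers length
instance (numbers : Int) (length : Option Int) (out : List String) : Decidable (Spec_unary_sequence numbers length out) := by unfold Spec_unary_sequence; infer_instance

-- ===== CLAIM =====
def Claim_equal_unary_sequence : Prop := ∀ (numbers : Int) (length : Option Int), Dom_unary_sequence numbers length → Spec_unary_sequence numbers length (unary_sequence numbers length)

-- ===== LEMMAS AND PROOFS =====

theorem foldl_append_singleton_eq_map {α β : Type} (f : α → β) (xs : List α) (acc : List β) :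
    xs.foldl (fun un_seq i => un_seq ++ [f i]) acc = acc ++ xs.map f := by
  induction xs generalizing acc with
  | nil => simp
  | cons x xs ih => simp [List.foldl, ih, List.append_assoc]

theorem binDigits_two_pow (k : Nat) : binDigits (2 ^ k) = '1' :: List.replicate k '0' := by
  induction k with
  | zero => simp [binDigits]
  | succ k ih =>
      rw [binDigits]
      have hdiv : 2 ^ (k + 1) / 2 = 2 ^ k := by
        rw [pow_succ]; exact Nat.mul_div_cancel _ (by norm_num)
      have hmod : 2 ^ (k + 1) % 2 = 0 := by
        rw [pow_succ]; exact Nat.mul_mod_left _ _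
      simp [hdiv, hmod, ih, ← List.replicate_succ']

theorem body_eq (numbers i : Int) (h0 : 0 ≤ i) (h1 : i < numbers) :
    String.mk (List.replicate i.toNat '0' ++ ['1'] ++ List.replicate (numbers - i - 1).toNat '0')
      = fmtBin (2 ^ (numbers - 1 - i).toNat) numbers.toNat := by
  have hk : (numbers - 1 - i).toNat = (numbers - i - 1).toNat := by omega
  have hx : (2 : Nat) ^ (numbers - i - 1).toNat ≠ 0 := (Nat.pow_pos (by norm_num)).ne'
  simp only [fmtBin, hk, beq_iff_eq, if_neg hx, binDigits_two_pow]
  have hlen : numbers.toNat - ('1' :: List.replicate (numbers - i - 1).toNat '0').length = i.toNat := by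
    simp only [List.length_cons, List.length_replicate]; omega
  rw [hlen]
  simp

-- ===== VERDICT =====
theorem unary_sequence_spec : Claim_equal_unary_sequence := by
  intro numbers length _
  unfold Spec_unary_sequence unary_sequence unary_sequence_alt
  rw [foldl_append_singleton_eq_map]
  simp only [List.nil_append]
  apply List.map_congr_left
  intro i hi
  rw [PySem.List.mem_pyRange_one] at hi
  exact body_eq _ i hi.1 hi.2
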